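-- pv_equiv track=rewrite | github.com/vishvedula/PythonExamples | FindThatSingleElement.py | singleton_element
-- ===== SOURCE A (Python) =====
-- def singleton_element(arr):
--     arr.sort()
--     if len(arr)>1:
--         count = 1
--     for i in range(0,len(arr)-1):
--         if arr[i]==arr[i+1]:
--             count = count+1
--             continue
--         elif count>1:
--             count =1
--             continue
--         else:
--             return arr[i]
-- ===== SOURCE B (Python) =====
-- def singleton_element(arr):
--     # Sorts arr in place (same side effect as the original), then returns the
--     # smallest value occurring exactly once, via a counting dict.
--     arr.sort()
--     counts = {}
--     for x in arr:
--         counts[x] = counts.get(x, 0) + 1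
--     for x, c in counts.items():
--         if c == 1:
--             return x
--     return None
-- ===== Notes on version B (the rewrite author's own statement) =====
-- stated objective: idiomatic
-- what changed: A scans adjacent pairs of the sorted array with a run counter and early return; B builds a counting dict over the sorted array in one pass and returns the first key with count 1, and it also returns the correct answer when that key is the largest value (where A's scan stops one short).
-- intended difference: On nonempty lists whose maximum occurs exactly once while every smaller value occurs at least twice, A returns None (its loop never examines the last run of the sorted array) but B returns that maximum, which is the smallest value occurring exactly once and hence the intended answer. — e.g. on singleton_element([1, 1, 2]): A returns none, B returns some 2
import Mathlib
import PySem

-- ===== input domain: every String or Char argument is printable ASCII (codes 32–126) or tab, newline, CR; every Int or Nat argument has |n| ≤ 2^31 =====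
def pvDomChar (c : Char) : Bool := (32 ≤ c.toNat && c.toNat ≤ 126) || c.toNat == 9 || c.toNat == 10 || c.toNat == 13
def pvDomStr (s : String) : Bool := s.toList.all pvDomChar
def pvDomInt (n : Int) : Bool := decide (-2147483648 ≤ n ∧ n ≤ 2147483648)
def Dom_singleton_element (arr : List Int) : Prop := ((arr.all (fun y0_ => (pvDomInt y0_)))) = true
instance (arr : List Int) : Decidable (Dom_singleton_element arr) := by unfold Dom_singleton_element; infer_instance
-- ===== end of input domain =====

-- B replaces A's adjacent run-counting scan by a counting dict over the sorted list;
-- both Pythons sort arr IN PLACE (same side effect), the equivalence is about the return value.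

-- ===== PORT A =====
-- the for-loop over range(0, len(arr)-1) with early return; indices i, i+1 are always in
-- range, so the `none` fallback of the match is unreachable
def pvALoop (s : List Int) : List Int → Int → Option Int
  | [], _ => none
  | i :: is, count =>
    match PySem.List.pyGet? s i, PySem.List.pyGet? s (i + 1) with
    | some a, some b =>
      if a = b then pvALoop s is (count + 1)
      else if count > 1 then pvALoop s is 1
      else some a
    | _, _ => none

def singleton_element (arr : List Int) : Option Int :=
  let s := PySem.List.sorted arr (fun x => x) false
  -- `count = 1` is only assigned when len(arr) > 1; when it is not, the loop body never
  -- runs, so passing 1 unconditionally is exact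
  pvALoop s (PySem.List.pyRange 0 ((s.length : Int) - 1) 1) 1

-- ===== PORT B =====
def pvBFind : List (Int × Int) → Option Int
  | [] => none
  | (x, c) :: rest => if c = 1 then some x else pvBFind rest

def singleton_element_alt (arr : List Int) : Option Int :=
  let s := PySem.List.sorted arr (fun x => x) false
  let counts := s.foldl (fun d x => d.insert x (d.getD x 0 + 1)) PySem.Dict.empty
  pvBFind counts.items

-- ===== PRECONDITION & SPEC =====
-- helper for D_: max of a nonempty list, as Python's max would compute it
def pvMax (l : List Int) : Int := l.foldl max (l.headD 0)

-- A scans only up to the second-to-last element of the sorted array, so when the unique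
-- smallest singleton is the LARGEST value (all smaller values repeated) A returns None;
-- B returns that value, which is the intended answer.
def D_singleton_element (arr : List Int) : Prop :=
  arr ≠ [] ∧ arr.count (pvMax arr) = 1 ∧ ∀ x ∈ arr, x = pvMax arr ∨ 2 ≤ arr.count x
instance (arr : List Int) : Decidable (D_singleton_element arr) := by
  unfold D_singleton_element; infer_instance

def Spec_singleton_element (arr : List Int) (out : Option Int) : Prop :=
  ¬ D_singleton_element arr → out = singleton_element_alt arr
instance (arr : List Int) (out : Option Int) : Decidable (Spec_singleton_element arr out) := by
  unfold Spec_singleton_element; infer_instance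

def pvDiffWitness_singleton_element : List Int := [1, 1, 2]
def pvDiffWitnessOut_singleton_element : (Option Int) × (Option Int) := (none, some 2)

-- ===== CLAIM (what is proved, stated in full; the proofs are below) =====
def Claim_unchanged_singleton_element : Prop :=
  ∀ (arr : List Int), Dom_singleton_element arr → Spec_singleton_element arr (singleton_element arr)
def Claim_changed_singleton_element : Prop :=
  Dom_singleton_element (pvDiffWitness_singleton_element) ∧
  D_singleton_element (pvDiffWitness_singleton_element) ∧
  singleton_element (pvDiffWitness_singleton_element) = pvDiffWitnessOut_singleton_element.1 ∧
  singleton_element_alt (pvDiffWitness_singleton_element) = pvDiffWitnessOut_singleton_element.2 ∧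
  pvDiffWitnessOut_singleton_element.1 ≠ pvDiffWitnessOut_singleton_element.2
def Claim_exact_singleton_element : Prop :=
  ∀ (arr : List Int), Dom_singleton_element arr → D_singleton_element arr →
    singleton_element arr ≠ singleton_element_alt arr

-- ===== LEMMAS AND PROOFS =====

-- recursion view of A's index loop: scan adjacent pairs carrying the run count
def pvARec : List Int → Int → Option Int
  | a :: b :: rest, cnt =>
    if a = b then pvARec (b :: rest) (cnt + 1)
    else if cnt > 1 then pvARec (b :: rest) 1
    else some a
  | _, _ => none

theorem pvARec_short (l : List Int) (cnt : Int) (h : l.length ≤ 1) : pvARec l cnt = none := by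
  match l with
  | [] => rfl
  | [a] => rfl
  | a :: b :: r => simp at h

-- bridge: the pyRange index loop equals the structural recursion on the dropped suffix
theorem pvALoop_bridge (s : List Int) :
    ∀ (k : Nat) (cnt : Int),
      pvALoop s (PySem.List.pyRange (k : Int) ((s.length : Int) - 1) 1) cnt =
        pvARec (s.drop k) cnt := by
  have H : ∀ (m k : Nat) (cnt : Int), s.length - k ≤ m →
      pvALoop s (PySem.List.pyRange (k : Int) ((s.length : Int) - 1) 1) cnt =
        pvARec (s.drop k) cnt := by
    intro m
    induction m with
    | zero =>
      intro k cnt hm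
      have hk : s.length ≤ k := by omega
      rw [PySem.List.pyRange_one_eq_nil (by omega : ((s.length : Int) - 1) ≤ (k : Int))]
      rw [List.drop_eq_nil_of_le hk]
      rfl
    | succ m ih =>
      intro k cnt hm
      by_cases hk : (k : Int) < (s.length : Int) - 1
      · have hk1 : k + 1 < s.length := by omega
        have hk0 : k < s.length := by omega
        rw [PySem.List.pyRange_one_cons hk]
        have hcast : ((k : Int) + 1) = ((k + 1 : Nat) : Int) := by push_cast; ring
        have hget0 : PySem.List.pyGet? s (k : Int) = some s[k] :=
          PySem.List.pyGet?_ofNat s k hk0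
        have hget1 : PySem.List.pyGet? s ((k : Int) + 1) = some s[k+1] := by
          rw [hcast]; exact PySem.List.pyGet?_ofNat s (k+1) hk1
        rw [pvALoop, hget0, hget1]
        dsimp only
        rw [List.drop_eq_getElem_cons hk0, List.drop_eq_getElem_cons hk1, pvARec]
        by_cases he : s[k] = s[k+1]
        · rw [if_pos he, if_pos he, hcast, ih (k+1) (cnt+1) (by omega)]
          rw [List.drop_eq_getElem_cons hk1]
        · rw [if_neg he, if_neg he]
          by_cases hc : cnt > 1
          · rw [if_pos hc, if_pos hc, hcast, ih (k+1) 1 (by omega)]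
            rw [List.drop_eq_getElem_cons hk1]
          · rw [if_neg hc, if_neg hc]
      · rw [PySem.List.pyRange_one_eq_nil (by omega : ((s.length : Int) - 1) ≤ (k : Int))]
        have : (s.drop k).length ≤ 1 := by
          rw [List.length_drop]; omega
        rw [pvARec_short _ _ this]
        rfl
  intro k cnt
  exact H (s.length - k) k cnt le_rfl

theorem singleton_element_eq_arec (arr : List Int) :
    singleton_element arr = pvARec (PySem.List.sorted arr (fun x => x) false) 1 := by
  have h := pvALoop_bridge (PySem.List.sorted arr (fun x => x) false) 0 1
  simp only [Nat.cast_zero, List.drop_zero] at h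
  exact h

-- A's recursion on one run: consume c copies of a, then decide at the boundary
theorem pvARec_group (a : Int) :
    ∀ (c : Nat) (t : List Int) (k : Int), 1 ≤ c → a ∉ t →
      pvARec (List.replicate c a ++ t) k =
        (if t = [] then none else if k + (c : Int) - 1 > 1 then pvARec t 1 else some a) := by
  intro c
  induction c with
  | zero => intro t k h; omega
  | succ c ih =>
    intro t k _ ht
    by_cases hc : c = 0
    · subst hc
      match t with
      | [] => rfl
      | b :: r =>
        have hab : a ≠ b := by intro h; exact ht (h ▸ List.mem_cons_self)
        show pvARec (a :: b :: r) k = _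
        rw [pvARec, if_neg hab, if_neg (List.cons_ne_nil b r)]
        have hk : k + ((0 + 1 : Nat) : Int) - 1 = k := by push_cast; ring
        rw [hk]
    · have hc1 : 1 ≤ c := by omega
      have h1 : List.replicate (c + 1) a ++ t = a :: (List.replicate c a ++ t) := by
        simp [List.replicate_succ]
      have h2 : List.replicate c a ++ t = a :: (List.replicate (c-1) a ++ t) := by
        conv_lhs => rw [show c = (c - 1) + 1 by omega, List.replicate_succ]
        simp
      rw [h1, h2, pvARec, if_pos rfl, ← h2, ih t (k + 1) hc1 ht]
      have h3 : (k + 1) + (c : Int) - 1 = k + ((c + 1 : Nat) : Int) - 1 := by push_cast; ring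
      rw [h3]

-- decomposition of a nonempty sorted list into its first run and the rest
theorem sorted_head_decomp (a : Int) (rest : List Int)
    (hs : (a :: rest).Pairwise (· ≤ ·)) :
    ∃ (c : Nat) (t : List Int),
      a :: rest = List.replicate c a ++ t ∧ 1 ≤ c ∧ a ∉ t ∧
      t.Pairwise (· ≤ ·) ∧ (∀ x ∈ t, a ≤ x) ∧ (a :: rest).count a = c := by
  classical
  have htake : List.takeWhile (fun x => x == a) (a :: rest) =
      List.replicate (List.takeWhile (fun x => x == a) (a :: rest)).length a := by
    rw [List.eq_replicate_iff]
    exact ⟨rfl, fun b hb => by simpa using List.mem_takeWhile_imp hb⟩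
  have hsplit : a :: rest =
      List.replicate (List.takeWhile (fun x => x == a) (a :: rest)).length a ++
        List.dropWhile (fun x => x == a) (a :: rest) := by
    conv_lhs => rw [← List.takeWhile_append_dropWhile (p := fun x => x == a) (l := a :: rest)]
    rw [← htake]
  have hle : ∀ x ∈ List.dropWhile (fun x => x == a) (a :: rest), a ≤ x := by
    intro x hx
    have hxs : x ∈ a :: rest := (List.dropWhile_sublist _).mem hx
    rcases List.mem_cons.mp hxs with h | h
    · omega
    · exact (List.pairwise_cons.mp hs).1 x h
  have htp : (List.dropWhile (fun x => x == a) (a :: rest)).Pairwise (· ≤ ·) :=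
    List.Pairwise.sublist (List.dropWhile_sublist _) hs
  have hnot : a ∉ List.dropWhile (fun x => x == a) (a :: rest) := by
    intro hat
    cases hd : List.dropWhile (fun x => x == a) (a :: rest) with
    | nil => rw [hd] at hat; exact List.not_mem_nil hat
    | cons b r =>
      have hba : ¬ (b == a) = true := by
        have := List.head?_dropWhile_not (fun x => x == a) (a :: rest)
        rw [hd] at this
        simpa using this
      rw [hd] at hat hle htp
      rcases List.mem_cons.mp hat with h | h
      · exact hba (by simp [h])
      · have h1 : b ≤ a := (List.pairwise_cons.mp htp).1 a h
        have h2 : a ≤ b := hle b List.mem_cons_self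
        exact hba (by simp; omega)
  refine ⟨(List.takeWhile (fun x => x == a) (a :: rest)).length,
    List.dropWhile (fun x => x == a) (a :: rest), hsplit, ?_, hnot, htp, hle, ?_⟩
  · rw [List.takeWhile_cons_of_pos (by simp)]
    simp
  · conv_lhs => rw [hsplit]
    rw [List.count_append, List.count_eq_zero_of_not_mem hnot]
    simp

theorem discard_of_not_mem (s : List Int) (a : Int) (h : a ∉ s) :
    PySem.Set.discard s a = s := by
  unfold PySem.Set.discard
  rw [List.filter_eq_self]
  intro y hy
  have : y ≠ a := fun he => h (he ▸ hy)
  simp [this]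

-- first-occurrence dedup of one run
theorem ofList_group (a : Int) :
    ∀ (c : Nat) (t : List Int), 1 ≤ c → a ∉ t →
      PySem.Set.ofList (List.replicate c a ++ t) = a :: PySem.Set.ofList t := by
  intro c
  induction c with
  | zero => intro t h; omega
  | succ c ih =>
    intro t _ ht
    have hna : a ∉ PySem.Set.ofList t := fun h => ht ((PySem.Set.mem_ofList _ _).mp h)
    by_cases hc : c = 0
    · subst hc
      show PySem.Set.ofList (a :: t) = _
      rw [PySem.Set.ofList_cons, discard_of_not_mem _ _ hna]
    · have hc1 : 1 ≤ c := by omega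
      rw [List.replicate_succ, List.cons_append, PySem.Set.ofList_cons, ih t hc1 ht]
      congr 1
      show PySem.Set.discard (a :: PySem.Set.ofList t) a = _
      unfold PySem.Set.discard
      rw [List.filter_cons, if_neg (by simp : ¬((!(a == a)) = true))]
      exact List.filter_eq_self.mpr (fun y hy => by
        have : y ≠ a := fun he => hna (he ▸ hy)
        simp [this])

-- the dedup of a sorted list is ≤-ordered
theorem ofList_sorted_pairwise (s : List Int) (hs : s.Pairwise (· ≤ ·)) :
    (PySem.Set.ofList s).Pairwise (· ≤ ·) := by
  have H : ∀ n (s : List Int), s.length ≤ n → s.Pairwise (· ≤ ·) →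
      (PySem.Set.ofList s).Pairwise (· ≤ ·) := by
    intro n
    induction n with
    | zero =>
      intro s hn _
      have : s = [] := List.eq_nil_of_length_eq_zero (by omega)
      subst this; exact List.Pairwise.nil
    | succ n ih =>
      intro s hn hp
      match s with
      | [] => exact List.Pairwise.nil
      | a :: rest =>
        obtain ⟨c, t, hsplit, hc1, hnot, htp, hle, _⟩ := sorted_head_decomp a rest hp
        rw [hsplit, ofList_group a c t hc1 hnot]
        refine List.pairwise_cons.mpr ⟨?_, ?_⟩
        · intro x hx
          exact hle x ((PySem.Set.mem_ofList _ _).mp hx)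
        · refine ih t ?_ htp
          have := congrArg List.length hsplit
          simp only [List.length_cons, List.length_append, List.length_replicate] at this
          simp only [List.length_cons] at hn
          omega
  exact H s.length s le_rfl hs

theorem find?_congr_mem {p q : Int → Bool} :
    ∀ (l : List Int), (∀ x ∈ l, p x = q x) → l.find? p = l.find? q := by
  intro l
  induction l with
  | nil => intro _; rfl
  | cons a l ih =>
    intro h
    have ha := h a List.mem_cons_self
    by_cases hp : p a = true
    · rw [List.find?_cons_of_pos hp, List.find?_cons_of_pos (ha ▸ hp)]
    · rw [List.find?_cons_of_neg hp, List.find?_cons_of_neg (ha ▸ hp)]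
      exact ih (fun x hx => h x (List.mem_cons_of_mem a hx))

-- main A-side characterisation: on a sorted list, A's scan is a find? over the
-- dedup WITHOUT its last element
theorem pvARec_char (s : List Int) (hs : s.Pairwise (· ≤ ·)) :
    pvARec s 1 =
      (PySem.Set.ofList s).dropLast.find? (fun k => decide (s.count k = 1)) := by
  have H : ∀ n (s : List Int), s.length ≤ n → s.Pairwise (· ≤ ·) →
      pvARec s 1 =
        (PySem.Set.ofList s).dropLast.find? (fun k => decide (s.count k = 1)) := by
    intro n
    induction n with
    | zero =>
      intro s hn _
      have : s = [] := List.eq_nil_of_length_eq_zero (by omega)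
      subst this; rfl
    | succ n ih =>
      intro s hn hp
      match s with
      | [] => rfl
      | a :: rest =>
        obtain ⟨c, t, hsplit, hc1, hnot, htp, hle, hcnt⟩ := sorted_head_decomp a rest hp
        rw [hsplit, ofList_group a c t hc1 hnot, pvARec_group a c t 1 hc1 hnot]
        have hlen : t.length + c = rest.length + 1 := by
          have := congrArg List.length hsplit
          simp only [List.length_cons, List.length_append, List.length_replicate] at this
          omega
        have hcount_a : (List.replicate c a ++ t).count a = c := by
          rw [List.count_append, List.count_eq_zero_of_not_mem hnot]
          simp
        match htt : t with
        | [] => rfl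
        | b :: r =>
          have htn : PySem.Set.ofList (b :: r) ≠ [] := by
            intro h
            have : b ∈ PySem.Set.ofList (b :: r) := (PySem.Set.mem_ofList _ _).mpr List.mem_cons_self
            rw [h] at this
            exact List.not_mem_nil this
          rw [if_neg (List.cons_ne_nil b r)]
          rw [List.dropLast_cons_of_ne_nil htn]
          have hsimp : (1:Int) + (c:Int) - 1 = (c:Int) := by ring
          rw [hsimp]
          by_cases hc1' : c = 1
          · rw [if_neg (show ¬((c:Int) > 1) by rw [hc1']; norm_num)]
            rw [List.find?_cons_of_pos (by simp [hc1', List.count_eq_zero_of_not_mem hnot])]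
          · rw [if_pos (show (c:Int) > 1 by omega)]
            rw [List.find?_cons_of_neg (by simp [hcount_a]; omega)]
            rw [ih (b :: r) (by simp at hlen hn ⊢; omega) htp]
            apply find?_congr_mem
            intro x hx
            have hxt : x ∈ b :: r := (PySem.Set.mem_ofList _ _).mp (List.mem_of_mem_dropLast hx)
            have hxa : x ≠ a := fun h => hnot (h ▸ hxt)
            have h0 : List.count x (List.replicate c a) = 0 := by
              rw [List.count_replicate]
              simp [Ne.symm hxa]
            simp [List.count_append, h0]
  exact H s.length s le_rfl hs

-- B-side: the counting dict's items scan is a find? over the dedup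
theorem pvBFind_map (s : List Int) :
    ∀ ks : List Int,
      pvBFind (ks.map (fun k => (k, (s.count k : Int)))) =
        ks.find? (fun k => decide (s.count k = 1)) := by
  intro ks
  induction ks with
  | nil => rfl
  | cons k ks ih =>
    rw [List.map_cons, pvBFind]
    by_cases h : s.count k = 1
    · rw [if_pos (by exact_mod_cast h), List.find?_cons_of_pos (by simp [h])]
    · rw [if_neg (by exact_mod_cast h), List.find?_cons_of_neg (by simp [h]), ih]

theorem singleton_element_alt_char (arr : List Int) :
    singleton_element_alt arr =
      (PySem.Set.ofList (PySem.List.sorted arr (fun x => x) false)).find?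
        (fun k => decide ((PySem.List.sorted arr (fun x => x) false).count k = 1)) := by
  show pvBFind _ = _
  rw [PySem.Dict.foldl_insert_getD_add_one_eq_counter, PySem.Dict.items_counter,
    pvBFind_map]

theorem foldl_max_init (l : List Int) : ∀ a : Int, a ≤ l.foldl max a := by
  induction l with
  | nil => intro a; exact le_refl a
  | cons b l ih =>
    intro a
    calc a ≤ max a b := le_max_left a b
      _ ≤ _ := ih (max a b)

theorem foldl_max_le (l : List Int) : ∀ (a : Int) (y : Int), y ∈ l → y ≤ l.foldl max a := by
  induction l with
  | nil => intro a y h; exact absurd h List.not_mem_nil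
  | cons b l ih =>
    intro a y hy
    rcases List.mem_cons.mp hy with h | h
    · subst h
      calc y ≤ max a y := le_max_right a y
        _ ≤ _ := foldl_max_init l (max a y)
    · exact ih (max a b) y h

theorem foldl_max_mem (l : List Int) : ∀ (a : Int), l.foldl max a = a ∨ l.foldl max a ∈ l := by
  induction l with
  | nil => intro a; left; rfl
  | cons b l ih =>
    intro a
    rcases ih (max a b) with h | h
    · simp only [List.foldl_cons]
      rcases max_cases a b with ⟨he, _⟩ | ⟨he, _⟩
      · left; rw [h, he]
      · right; rw [h, he]; exact List.mem_cons_self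
    · right
      simp only [List.foldl_cons]
      exact List.mem_cons_of_mem b h

theorem pvMax_mem (l : List Int) (h : l ≠ []) : pvMax l ∈ l := by
  match l with
  | a :: rest =>
    unfold pvMax
    simp only [List.headD_cons, List.foldl_cons, max_self]
    rcases foldl_max_mem rest a with h1 | h1
    · rw [h1]; exact List.mem_cons_self
    · exact List.mem_cons_of_mem a h1

theorem pvMax_le (l : List Int) (y : Int) (hy : y ∈ l) : y ≤ pvMax l := by
  match l with
  | a :: rest =>
    unfold pvMax
    simp only [List.headD_cons, List.foldl_cons, max_self]
    rcases List.mem_cons.mp hy with h | h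
    · subst h; exact foldl_max_init rest y
    · exact foldl_max_le rest a y h

-- elements of an ≤-pairwise list are bounded by its last element
theorem pairwise_le_getLast (l : List Int) (hl : l ≠ []) (hp : l.Pairwise (· ≤ ·))
    (x : Int) (hx : x ∈ l) : x ≤ l.getLast hl := by
  have hsplit := (List.dropLast_append_getLast hl).symm
  rcases (List.mem_append.mp (hsplit ▸ hx)) with h | h
  · have hpl := hsplit ▸ hp
    rw [List.pairwise_append] at hpl
    exact hpl.2.2 x h _ List.mem_cons_self
  · simp at h; omega

theorem singleton_element_main (arr : List Int) :
    (¬ D_singleton_element arr → singleton_element arr = singleton_element_alt arr) ∧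
    (D_singleton_element arr → singleton_element arr = none ∧
      singleton_element_alt arr = some (pvMax arr)) := by
  classical
  have hperm : (PySem.List.sorted arr (fun x => x) false).Perm arr :=
    PySem.List.sorted_perm arr (fun x => x) false
  set s := PySem.List.sorted arr (fun x => x) false with hsdef
  have hsp : s.Pairwise (· ≤ ·) := by
    have := PySem.List.sorted_pairwise arr (fun x => x)
    simpa using this
  have hA : singleton_element arr =
      (PySem.Set.ofList s).dropLast.find? (fun k => decide (s.count k = 1)) := by
    rw [singleton_element_eq_arec, pvARec_char s hsp]
  have hB : singleton_element_alt arr =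
      (PySem.Set.ofList s).find? (fun k => decide (s.count k = 1)) :=
    singleton_element_alt_char arr
  have hcnt : ∀ x, s.count x = arr.count x := fun x => hperm.count_eq x
  by_cases hnil : arr = []
  · subst hnil
    have hs0 : s = [] := hperm.eq_nil
    constructor
    · intro _; rw [hA, hB, hs0]; rfl
    · intro hD; exact absurd rfl hD.1
  · have hsne : s ≠ [] := by
      intro h
      apply hnil
      have h2 := hperm
      rw [h] at h2
      exact h2.symm.eq_nil
    set ks := PySem.Set.ofList s with hksdef
    have hksne : ks ≠ [] := by
      intro h
      obtain ⟨a, ha⟩ := List.exists_mem_of_ne_nil s hsne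
      have : a ∈ ks := (PySem.Set.mem_ofList _ _).mpr ha
      rw [h] at this
      exact List.not_mem_nil this
    have hksp : ks.Pairwise (· ≤ ·) := ofList_sorted_pairwise s hsp
    set m := ks.getLast hksne with hmdef
    have hksplit : ks = ks.dropLast ++ [m] := (List.dropLast_append_getLast hksne).symm
    have hmem_ks : ∀ x : Int, x ∈ ks ↔ x ∈ s := fun x => PySem.Set.mem_ofList _ _
    have hmem_arr : ∀ x : Int, x ∈ s ↔ x ∈ arr := fun x => hperm.mem_iff
    have hm_max : m = pvMax arr := by
      have h1 : m ∈ arr := (hmem_arr m).mp ((hmem_ks m).mp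
        (hksplit ▸ List.mem_append_right _ List.mem_cons_self))
      have h2 : pvMax arr ∈ ks := (hmem_ks _).mpr ((hmem_arr _).mpr (pvMax_mem arr hnil))
      have h3 : pvMax arr ≤ m := pairwise_le_getLast ks hksne hksp _ h2
      have h4 : m ≤ pvMax arr := pvMax_le arr m h1
      omega
    have hone : List.find? (fun k => decide (s.count k = 1)) [m] =
        (if s.count m = 1 then some m else none) := by
      by_cases h : s.count m = 1 <;> simp [List.find?, h]
    have hfind : ks.find? (fun k => decide (s.count k = 1)) =
        ((ks.dropLast.find? (fun k => decide (s.count k = 1))).or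
          (if s.count m = 1 then some m else none)) := by
      conv_lhs => rw [hksplit]
      rw [List.find?_append, hone]
    have hnodup : ks.Nodup := PySem.Set.nodup_ofList _
    constructor
    · intro hnD
      rw [hA, hB, hfind]
      match hfd : ks.dropLast.find? (fun k => decide (s.count k = 1)) with
      | some v => rfl
      | none =>
        simp only [Option.none_or]
        split_ifs with hm1
        · exfalso
          apply hnD
          refine ⟨hnil, ?_, ?_⟩
          · rw [← hm_max, ← hcnt]; exact hm1
          · intro x hx
            rw [← hm_max]
            by_cases hxm : x = m
            · left; exact hxm
            · right
              have hxks : x ∈ ks := (hmem_ks x).mpr ((hmem_arr x).mpr hx)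
              have hxdl : x ∈ ks.dropLast := by
                rcases List.mem_append.mp (hksplit ▸ hxks) with h | h
                · exact h
                · simp at h; exact absurd h hxm
              have hne1 := List.find?_eq_none.mp hfd x hxdl
              simp only [decide_eq_true_eq] at hne1
              have hpos : 1 ≤ s.count x :=
                List.count_pos_iff.mpr ((hmem_arr x).mpr hx)
              rw [← hcnt]
              omega
        · rfl
    · intro hD
      obtain ⟨-, hcm, hall⟩ := hD
      have hdisj := List.disjoint_of_nodup_append (hksplit ▸ hnodup)
      have hdl_none : ks.dropLast.find? (fun k => decide (s.count k = 1)) = none := by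
        rw [List.find?_eq_none]
        intro x hxdl
        have hxks : x ∈ ks := List.mem_of_mem_dropLast hxdl
        have hxarr : x ∈ arr := (hmem_arr x).mp ((hmem_ks x).mp hxks)
        have hxm : x ≠ m := by
          intro h
          exact hdisj hxdl (by simp [h])
        rcases hall x hxarr with h | h
        · exact absurd (hm_max ▸ h) hxm
        · simp only [decide_eq_true_eq, hcnt]
          omega
      refine ⟨?_, ?_⟩
      · rw [hA, hdl_none]
      · rw [hB, hfind, hdl_none]
        simp only [Option.none_or]
        rw [if_pos (by rw [hcnt, hm_max]; exact hcm), hm_max]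

-- ===== VERDICT (by name: the statement is the Claim_ definition above) =====
theorem singleton_element_spec : Claim_unchanged_singleton_element := by
  intro arr _ hnD
  exact (singleton_element_main arr).1 hnD

theorem singleton_element_changed : Claim_changed_singleton_element := by
  unfold Claim_changed_singleton_element; decide

theorem singleton_element_tight : Claim_exact_singleton_element := by
  intro arr _ hD
  obtain ⟨h1, h2⟩ := (singleton_element_main arr).2 hD
  rw [h1, h2]
  simp
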